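-- pv_equiv track=rewrite | github.com/underflow101/code-example | ps/simulation/keumminsoo.py | check
-- ===== SOURCE A (Python) =====
-- def check(k):
--     while k > 3:
--         flag = False
--         tmp = list(str(k))
--         for i in range(len(tmp)):
--             if tmp[i] != '4' and tmp[i] != '7':
--                 k -= 1
--                 flag = True
--                 break
--         if flag:
--             continue
--         else:
--             return k
-- ===== SOURCE B (Python) =====
-- def check(k):
--     # Enumerate every "lucky" number (digits only 4/7) of 1..10 digits by digit
--     # construction, then return the largest one <= k (None if none is <= k).
--     cands = [4, 7]
--     frontier = [4, 7]
--     for _ in range(9):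
--         frontier = [10 * m + d for m in frontier for d in (4, 7)]
--         cands += frontier
--     best = None
--     for n in cands:
--         if n <= k and (best is None or n > best):
--             best = n
--     return best
-- ===== Notes on version B (the rewrite author's own statement) =====
-- stated objective: faster
-- what changed: A counts down from k one number at a time, re-stringifying each and scanning its digits; B directly constructs every number whose digits are only fours and sevens (1 to 10 digits, ~2046 candidates) and returns the largest one <= k.
import Mathlib
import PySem

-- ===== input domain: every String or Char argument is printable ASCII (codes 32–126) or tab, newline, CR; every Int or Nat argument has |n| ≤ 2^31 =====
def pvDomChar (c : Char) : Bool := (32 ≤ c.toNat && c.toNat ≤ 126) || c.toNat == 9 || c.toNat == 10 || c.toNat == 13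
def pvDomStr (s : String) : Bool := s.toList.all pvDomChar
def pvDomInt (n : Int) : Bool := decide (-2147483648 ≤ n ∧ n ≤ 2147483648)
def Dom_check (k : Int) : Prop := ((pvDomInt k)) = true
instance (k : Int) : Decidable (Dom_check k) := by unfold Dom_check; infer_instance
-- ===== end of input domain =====

-- B replaces A's one-by-one countdown from k by direct digit construction of the bounded
-- family of numbers with only digits four and seven, followed by a max-below-k scan (faster).

-- ===== PORT A =====
-- the inner "for i in range(len(tmp)): if tmp[i] != '4' and tmp[i] != '7': … break" scan
def badScan : List Char → Bool
  | [] => false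
  | c :: cs => if c ≠ '4' && c ≠ '7' then true else badScan cs

def check (k : Int) : Option Int :=
  if k > 3 then
    if badScan (PySem.Int.toStr k).toList then check (k - 1) else some k
  else none
termination_by (k - 3).toNat
decreasing_by omega

-- ===== PORT B =====
-- frontier = [10 * m + d for m in frontier for d in (4, 7)]
def nextLevel (fr : List Int) : List Int := fr.flatMap (fun m => [10 * m + 4, 10 * m + 7])

-- the "for _ in range(9)" construction loop; state = (cands, frontier)
def buildCands : List Int × List Int :=
  (List.range 9).foldl (fun st _ => let fr := nextLevel st.2; (st.1 ++ fr, fr)) ([4, 7], [4, 7])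

-- "if n <= k and (best is None or n > best): best = n"
def bestStep (k : Int) (best : Option Int) (n : Int) : Option Int :=
  if decide (n ≤ k) && best.elim true (fun b => decide (b < n)) then some n else best

def check_alt (k : Int) : Option Int := buildCands.1.foldl (bestStep k) none

-- ===== PRECONDITION & SPEC =====
def Spec_check (k : Int) (out : Option Int) : Prop := out = check_alt k
instance (k : Int) (out : Option Int) : Decidable (Spec_check k out) := by unfold Spec_check; infer_instance

-- ===== CLAIM (what is proved, stated in full; the proofs are below) =====
def Claim_equal_check : Prop := ∀ (k : Int), Dom_check k → Spec_check k (check k)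

-- ===== LEMMAS AND PROOFS =====

-- decimal digit characters of n, most significant first (what str builds for n ≥ 0)
def myDigits (n : Nat) : List Char :=
  if n < 10 then [Nat.digitChar n] else myDigits (n / 10) ++ [Nat.digitChar (n % 10)]
termination_by n
decreasing_by exact Nat.div_lt_self (by omega) (by omega)

theorem toDigitsCore_eq_myDigits : ∀ (f n : Nat) (l : List Char), n < f →
    Nat.toDigitsCore 10 f n l = myDigits n ++ l := by
  intro f
  induction f with
  | zero => intro n l h; omega
  | succ f ih =>
    intro n l h
    rw [Nat.toDigitsCore]
    by_cases h10 : n < 10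
    · have h0 : n / 10 = 0 := Nat.div_eq_of_lt h10
      rw [myDigits]
      simp [h0, h10, Nat.mod_eq_of_lt h10]
    · have hne : ¬ n / 10 = 0 := by omega
      have hlt : n / 10 < f := lt_of_lt_of_le (Nat.div_lt_self (by omega) (by omega)) (by omega)
      rw [if_neg hne, ih (n / 10) _ hlt]
      conv_rhs => rw [myDigits]
      rw [if_neg h10, List.append_assoc]
      rfl

theorem toChars_eq_myDigits (k : Int) (h : 0 ≤ k) :
    PySem.Int.toChars k = myDigits k.toNat := by
  have hneg : ¬ k < 0 := by omega
  simp only [PySem.Int.toChars, hneg, if_false, Nat.toDigits]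
  have := toDigitsCore_eq_myDigits (k.toNat + 1) k.toNat [] (by omega)
  simpa using this

-- every digit character is '4' or '7'
def allGood (cs : List Char) : Prop := ∀ c ∈ cs, c = '4' ∨ c = '7'

theorem badScan_false_iff (cs : List Char) : badScan cs = false ↔ allGood cs := by
  induction cs with
  | nil => simp [badScan, allGood]
  | cons c cs ih =>
    by_cases hc : c = '4' ∨ c = '7'
    · have hb : (c ≠ '4' && c ≠ '7') = false := by
        rcases hc with h | h <;> simp [h]
      simp only [badScan, hb, Bool.false_eq_true, if_false, ih, allGood, List.mem_cons]
      constructor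
      · intro h x hx
        rcases hx with h' | h'
        · exact h' ▸ hc
        · exact h x h'
      · intro h x hx; exact h x (Or.inr hx)
    · rw [not_or] at hc
      have hb : (c ≠ '4' && c ≠ '7') = true := by simp [hc.1, hc.2]
      constructor
      · intro h
        simp [badScan] at h
        exact absurd (h.1 hc.1) hc.2
      · intro h
        exfalso
        rcases h c List.mem_cons_self with h' | h'
        · exact hc.1 h'
        · exact hc.2 h'

-- the lucky numbers with exactly j+1 digits, and their union up to d digits
def level : Nat → List Int
  | 0 => [4, 7]
  | j + 1 => nextLevel (level j)

def levelsUpto (d : Nat) : List Int := (List.range d).flatMap level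

set_option maxRecDepth 8192 in
theorem cands_eq : buildCands.1 = levelsUpto 10 := by decide

theorem mem_level_step {m : Int} {j : Nat} (hm : m ∈ level j) (r : Int) (hr : r = 4 ∨ r = 7) :
    10 * m + r ∈ level (j + 1) := by
  simp only [level, nextLevel, List.mem_flatMap]
  exact ⟨m, hm, by rcases hr with h | h <;> simp [h]⟩

theorem allGood_digit (r : Nat) (hr : r = 4 ∨ r = 7) : allGood (myDigits r) := by
  rcases hr with h | h <;> subst h <;>
    · rw [myDigits, if_pos (by norm_num)]
      intro c hc
      simp only [List.mem_singleton] at hc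
      subst hc
      decide

theorem myDigits_lucky_step (a : Nat) (r : Nat) (ha : 0 < a) (hr : r = 4 ∨ r = 7) :
    myDigits (10 * a + r) = myDigits a ++ [Nat.digitChar r] := by
  have h10 : ¬ 10 * a + r < 10 := by omega
  rw [myDigits, if_neg h10]
  have hd : (10 * a + r) / 10 = a := by omega
  have hm : (10 * a + r) % 10 = r := by omega
  rw [hd, hm]

theorem level_sound : ∀ (j : Nat), ∀ m ∈ level j, 4 ≤ m ∧ allGood (myDigits m.toNat) := by
  intro j
  induction j with
  | zero =>
    intro m hm
    simp only [level, List.mem_cons, List.not_mem_nil, or_false] at hm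
    rcases hm with h | h <;> subst h
    · exact ⟨by omega, allGood_digit 4 (Or.inl rfl)⟩
    · exact ⟨by omega, allGood_digit 7 (Or.inr rfl)⟩
  | succ j ih =>
    intro m hm
    simp only [level, nextLevel, List.mem_flatMap, List.mem_cons, List.not_mem_nil,
      or_false] at hm
    obtain ⟨p, hp, hmem⟩ := hm
    obtain ⟨hp4, hpg⟩ := ih p hp
    have hr : ∃ r : Nat, (r = 4 ∨ r = 7) ∧ m = 10 * p + (r : Int) := by
      rcases hmem with h | h
      · exact ⟨4, Or.inl rfl, by omega⟩
      · exact ⟨7, Or.inr rfl, by omega⟩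
    obtain ⟨r, hrv, hme⟩ := hr
    refine ⟨by omega, ?_⟩
    have hnat : m.toNat = 10 * p.toNat + r := by omega
    rw [hnat, myDigits_lucky_step p.toNat r (by omega) hrv]
    intro c hc
    rcases List.mem_append.mp hc with h | h
    · exact hpg c h
    · simp only [List.mem_singleton] at h
      subst h
      rcases hrv with h | h <;> subst h <;> decide

theorem level_complete : ∀ (d m : Nat), 0 < m → m < 10 ^ d → allGood (myDigits m) →
    (m : Int) ∈ levelsUpto d := by
  intro d
  induction d with
  | zero => intro m h1 h2; omega
  | succ d ih =>
    intro m h1 h2 hg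
    by_cases h10 : m < 10
    · have hgood : Nat.digitChar m = '4' ∨ Nat.digitChar m = '7' := by
        apply hg; rw [myDigits]; simp [h10]
      have hm : m = 4 ∨ m = 7 := by
        interval_cases m <;> revert hgood <;> decide
      simp only [levelsUpto, List.mem_flatMap, List.mem_range]
      exact ⟨0, by omega, by rcases hm with h | h <;> simp [h, level]⟩
    · have hga : allGood (myDigits (m / 10)) ∧
          (Nat.digitChar (m % 10) = '4' ∨ Nat.digitChar (m % 10) = '7') := by
        rw [myDigits] at hg
        simp only [h10, if_false] at hg
        constructor
        · intro c hc; exact hg c (List.mem_append.mpr (Or.inl hc))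
        · exact hg _ (List.mem_append.mpr (Or.inr (by simp)))
      have hmod : m % 10 = 4 ∨ m % 10 = 7 := by
        have h2' := hga.2
        have hlt : m % 10 < 10 := Nat.mod_lt _ (by omega)
        interval_cases h : m % 10 <;> revert h2' <;> decide
      have hdivpos : 0 < m / 10 := Nat.div_pos (by omega) (by omega)
      have hdivlt : m / 10 < 10 ^ d := by
        rw [Nat.div_lt_iff_lt_mul (by norm_num)]
        calc m < 10 ^ (d + 1) := h2
          _ = 10 ^ d * 10 := by ring
      have hmem := ih (m / 10) hdivpos hdivlt hga.1
      simp only [levelsUpto, List.mem_flatMap, List.mem_range] at hmem ⊢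
      obtain ⟨j, hj, hmemj⟩ := hmem
      refine ⟨j + 1, by omega, ?_⟩
      have heq : (m : Int) = 10 * ((m / 10 : Nat) : Int) + ((m % 10 : Nat) : Int) := by
        push_cast; omega
      rw [heq]
      exact mem_level_step hmemj _ (by rcases hmod with h | h <;> simp [h])

theorem cands_sound : ∀ m ∈ buildCands.1, 4 ≤ m ∧ allGood (myDigits m.toNat) := by
  rw [cands_eq]
  intro m hm
  simp only [levelsUpto, List.mem_flatMap] at hm
  obtain ⟨j, _, hj⟩ := hm
  exact level_sound j m hj

theorem cands_complete (k : Int) (h3 : 3 < k) (hub : k ≤ 2147483648)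
    (hg : allGood (myDigits k.toNat)) : k ∈ buildCands.1 := by
  rw [cands_eq]
  have h1 : 0 < k.toNat := by omega
  have h2 : k.toNat < 10 ^ 10 := by omega
  have := level_complete 10 k.toNat h1 h2 hg
  rwa [Int.toNat_of_nonneg (by omega)] at this

-- generic facts about B's max-selection fold
theorem bestLoop_id (k : Int) : ∀ (l : List Int) (b : Option Int),
    (∀ n ∈ l, ¬ n ≤ k) → l.foldl (bestStep k) b = b := by
  intro l
  induction l with
  | nil => intro b _; rfl
  | cons x l ih =>
    intro b h
    have hx : ¬ x ≤ k := h x (by simp)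
    have hstep : bestStep k b x = b := by simp [bestStep, hx]
    simp only [List.foldl_cons, hstep]
    exact ih b (fun n hn => h n (by simp [hn]))

theorem bestLoop_grow (k : Int) : ∀ (l : List Int) (v : Int),
    ∃ r, l.foldl (bestStep k) (some v) = some r ∧ v ≤ r := by
  intro l
  induction l with
  | nil => intro v; exact ⟨v, rfl, le_refl v⟩
  | cons y l ih =>
    intro v
    simp only [List.foldl_cons]
    by_cases hy : (decide (y ≤ k) && (some v).elim true (fun b => decide (b < y))) = true
    · obtain ⟨r, hr, hvr⟩ := ih y
      have hvy : v < y := by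
        simp only [Option.elim, Bool.and_eq_true, decide_eq_true_eq] at hy
        exact hy.2
      exact ⟨r, by simp only [bestStep, hy, if_true]; exact hr, by omega⟩
    · obtain ⟨r, hr, hvr⟩ := ih v
      exact ⟨r, by simp only [bestStep, hy]; exact hr, hvr⟩

theorem bestLoop_ge (k : Int) : ∀ (l : List Int) (b : Option Int) (n : Int),
    n ∈ l → n ≤ k → ∃ r, l.foldl (bestStep k) b = some r ∧ n ≤ r := by
  intro l
  induction l with
  | nil => intro b n hn; cases hn
  | cons x l ih =>
    intro b n hn hnk
    rcases List.mem_cons.mp hn with h | h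
    · subst h
      simp only [List.foldl_cons]
      by_cases hb : (decide (n ≤ k) && b.elim true (fun b => decide (b < n))) = true
      · obtain ⟨r, hr, hvr⟩ := bestLoop_grow k l n
        exact ⟨r, by simp only [bestStep, hb, if_true]; exact hr, hvr⟩
      · cases b with
        | none => simp [hnk] at hb
        | some v =>
          have hnv : n ≤ v := by
            simp only [Option.elim, Bool.and_eq_true, decide_eq_true_eq] at hb
            by_cases h1 : n ≤ k
            · have := fun h2 => hb ⟨h1, h2⟩; omega
            · exact absurd hnk h1
          obtain ⟨r, hr, hvr⟩ := bestLoop_grow k l v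
          refine ⟨r, ?_, by omega⟩
          simp only [bestStep, hb]
          exact hr
    · simp only [List.foldl_cons]
      exact ih (bestStep k b x) n h hnk

theorem bestLoop_mem (k : Int) : ∀ (l : List Int) (b : Option Int),
    l.foldl (bestStep k) b = b ∨ ∃ n ∈ l, l.foldl (bestStep k) b = some n ∧ n ≤ k := by
  intro l
  induction l with
  | nil => intro b; exact Or.inl rfl
  | cons x l ih =>
    intro b
    simp only [List.foldl_cons]
    by_cases hx : (decide (x ≤ k) && b.elim true (fun b => decide (b < x))) = true
    · have hxk : x ≤ k := by
        simp only [Bool.and_eq_true, decide_eq_true_eq] at hx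
        exact hx.1
      rcases ih (some x) with h | ⟨n, hn, hr, hnk⟩
      · exact Or.inr ⟨x, by simp, by simp only [bestStep, hx, if_true]; exact h, hxk⟩
      · exact Or.inr ⟨n, by simp [hn], by simp only [bestStep, hx, if_true]; exact hr, hnk⟩
    · rcases ih b with h | ⟨n, hn, hr, hnk⟩
      · exact Or.inl (by simp only [bestStep, hx]; exact h)
      · exact Or.inr ⟨n, by simp [hn], by simp only [bestStep, hx]; exact hr, hnk⟩

theorem check_alt_of_mem (k : Int) (hk : k ∈ buildCands.1) : check_alt k = some k := by
  unfold check_alt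
  obtain ⟨r, hr, hkr⟩ := bestLoop_ge k buildCands.1 none k hk (le_refl k)
  rcases bestLoop_mem k buildCands.1 none with h | ⟨n, _, hn, hnk⟩
  · rw [h] at hr; cases hr
  · rw [hn] at hr
    have hnr : n = r := by injection hr
    have hnk' : n = k := by omega
    rw [hn, hnk']

theorem check_alt_shift (k : Int) (hk : k ∉ buildCands.1) : check_alt k = check_alt (k - 1) := by
  unfold check_alt
  apply PySem.List.foldl_congr_mem
  intro acc x hx
  have hne : x ≠ k := fun h => hk (h ▸ hx)
  unfold bestStep
  have hiff : decide (x ≤ k) = decide (x ≤ k - 1) := by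
    by_cases h : x ≤ k - 1
    · have h2 : x ≤ k := by omega
      simp [h, h2]
    · have h2 : ¬ x ≤ k := by omega
      simp [h, h2]
  rw [hiff]

theorem check_alt_small (k : Int) (hk : k ≤ 3) : check_alt k = none := by
  unfold check_alt
  apply bestLoop_id
  intro n hn
  have := (cands_sound n hn).1
  omega

theorem main_aux : ∀ (N : Nat) (k : Int), k ≤ 2147483648 → (k - 3).toNat ≤ N →
    check k = check_alt k := by
  intro N
  induction N with
  | zero =>
    intro k hub hN
    have hk : k ≤ 3 := by omega
    rw [check, if_neg (by omega), check_alt_small k hk]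
  | succ N ih =>
    intro k hub hN
    by_cases h3 : k > 3
    · rw [check, if_pos h3]
      by_cases hb : badScan (PySem.Int.toStr k).toList = true
      · rw [if_pos hb]
        have hgood : ¬ allGood (myDigits k.toNat) := by
          intro hg
          have hf : badScan (PySem.Int.toStr k).toList = false := by
            rw [PySem.Int.toList_toStr, toChars_eq_myDigits k (by omega)]
            exact (badScan_false_iff _).mpr hg
          rw [hf] at hb; cases hb
        have hnm : k ∉ buildCands.1 := fun hm => hgood (cands_sound k hm).2
        rw [ih (k - 1) (by omega) (by omega), check_alt_shift k hnm]
      · rw [if_neg hb]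
        have hg : allGood (myDigits k.toNat) := by
          rw [PySem.Int.toList_toStr, toChars_eq_myDigits k (by omega)] at hb
          exact (badScan_false_iff _).mp (by simpa using hb)
        exact (check_alt_of_mem k (cands_complete k h3 hub hg)).symm
    · rw [check, if_neg h3, check_alt_small k (by omega)]

-- ===== VERDICT (by name: the statement is the Claim_ definition above) =====
theorem check_spec : Claim_equal_check := by
  intro k hdom
  unfold Spec_check
  have hb : -2147483648 ≤ k ∧ k ≤ 2147483648 := by
    simpa [Dom_check, pvDomInt] using hdom
  exact main_aux (k - 3).toNat k hb.2 (le_refl _)
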